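-- pv_equiv track=rewrite | github.com/fernandoYepes/2025_-PraTi-Codifica | ListaTarefas2/ListaTarefas2_Opcional_FernandoYepes/Atividade48.py | combinar_inventarios
-- ===== SOURCE A (Python) =====
-- def combinar_inventarios(inventario_a, inventario_b):
--
--
--     inventario_total = inventario_a.copy()
--
--     for item, quantidade_b in inventario_b.items():
--         if item in inventario_total:
--             inventario_total[item] += quantidade_b
--         else:
--             inventario_total[item] = quantidade_b
--
--     return inventario_total
-- ===== SOURCE B (Python) =====
-- def combinar_inventarios(inventario_a, inventario_b):
--     em_ambos_ou_so_a = {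
--         item: (qa + inventario_b[item] if item in inventario_b else qa)
--         for item, qa in inventario_a.items()
--     }
--     so_em_b = {
--         item: qb for item, qb in inventario_b.items() if item not in inventario_a
--     }
--     return {**em_ambos_ou_so_a, **so_em_b}
-- ===== Notes on version B (the rewrite author's own statement) =====
-- stated objective: idiomatic
-- what changed: Replaces A's copy-then-mutating-update loop with a single union traversal building a fresh dict from two comprehensions (keys of a with an explicit in-both sum, then keys only in b), merged with {**,**}; no argument is mutated and no intermediate dict is updated in place. Pre_ only excludes association lists with duplicate keys, which encode no Python dict input.
import Mathlib
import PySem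

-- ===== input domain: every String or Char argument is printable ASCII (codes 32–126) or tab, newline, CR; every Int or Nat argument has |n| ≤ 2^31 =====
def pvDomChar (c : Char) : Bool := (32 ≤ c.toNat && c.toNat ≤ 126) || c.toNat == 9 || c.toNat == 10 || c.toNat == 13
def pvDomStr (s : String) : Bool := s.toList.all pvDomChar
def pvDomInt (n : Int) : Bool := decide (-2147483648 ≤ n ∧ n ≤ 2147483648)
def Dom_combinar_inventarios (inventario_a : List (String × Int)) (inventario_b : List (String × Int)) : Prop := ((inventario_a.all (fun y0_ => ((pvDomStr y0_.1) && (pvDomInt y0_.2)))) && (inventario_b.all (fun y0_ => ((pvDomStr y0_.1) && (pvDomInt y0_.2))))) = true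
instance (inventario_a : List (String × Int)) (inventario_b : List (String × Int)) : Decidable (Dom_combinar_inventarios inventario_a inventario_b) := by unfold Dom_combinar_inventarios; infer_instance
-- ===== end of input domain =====

-- B rebuilds the merged inventory as a fresh dict via a union traversal (two comprehensions merged),
-- instead of A's copy-then-mutating-update loop; objective: idiomatic. Return-value equivalence only.


-- ===== PORT A =====
def combinar_inventarios (inventario_a : List (String × Int)) (inventario_b : List (String × Int)) : List (String × Int) :=
  -- inventario_total = inventario_a.copy(); then the for-loop over inventario_b.items()
  (inventario_b.foldl
    (fun inventario_total p =>
      if inventario_total.contains p.1 then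
        inventario_total.modify p.1 0 (· + p.2)      -- inventario_total[item] += quantidade_b (key present)
      else
        inventario_total.insert p.1 p.2)
    (PySem.Dict.ofList inventario_a)).items

-- ===== PORT B =====
def combinar_inventarios_alt (inventario_a : List (String × Int)) (inventario_b : List (String × Int)) : List (String × Int) :=
  let db := PySem.Dict.ofList inventario_b
  let da := PySem.Dict.ofList inventario_a
  let em_ambos_ou_so_a :=            -- {item: qa + b[item] if item in b else qa for item, qa in a.items()}
    inventario_a.map (fun p =>
      (p.1, match db.get? p.1 with
            | some qb => p.2 + qb
            | none => p.2))
  let so_em_b :=                     -- {item: qb for item, qb in b.items() if item not in a}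
    inventario_b.filter (fun p => !da.contains p.1)
  em_ambos_ou_so_a ++ so_em_b        -- {**em_ambos_ou_so_a, **so_em_b} (key sets disjoint)

-- ===== PRECONDITION & SPEC =====
-- The association lists encode Python dicts, whose keys are unique; Pre_ only excludes lists with
-- duplicate keys, which represent no Python input (every actual dict argument satisfies Pre_).
def Pre_combinar_inventarios (inventario_a : List (String × Int)) (inventario_b : List (String × Int)) : Prop :=
  (inventario_a.map Prod.fst).Nodup ∧ (inventario_b.map Prod.fst).Nodup
instance (inventario_a : List (String × Int)) (inventario_b : List (String × Int)) : Decidable (Pre_combinar_inventarios inventario_a inventario_b) := by unfold Pre_combinar_inventarios; infer_instance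
def pvWitness_combinar_inventarios : (List (String × Int)) × (List (String × Int)) :=
  ([("maca", 3), ("pera", 1)], [("pera", 2), ("uva", 5)])

def Spec_combinar_inventarios (inventario_a : List (String × Int)) (inventario_b : List (String × Int)) (out : List (String × Int)) : Prop := out = combinar_inventarios_alt inventario_a inventario_b
instance (inventario_a : List (String × Int)) (inventario_b : List (String × Int)) (out : List (String × Int)) : Decidable (Spec_combinar_inventarios inventario_a inventario_b out) := by unfold Spec_combinar_inventarios; infer_instance

-- ===== CLAIM (what is proved, stated in full; the proofs are below) =====
def Claim_equal_combinar_inventarios : Prop := ∀ (inventario_a : List (String × Int)) (inventario_b : List (String × Int)), Dom_combinar_inventarios inventario_a inventario_b → Pre_combinar_inventarios inventario_a inventario_b → Spec_combinar_inventarios inventario_a inventario_b (combinar_inventarios inventario_a inventario_b)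

-- ===== LEMMAS AND PROOFS =====

-- total quantity stored under key k in the association list l (0 or the single value when keys are unique)
def sumAt (l : List (String × Int)) (k : String) : Int :=
  ((l.filter (fun p => p.1 == k)).map Prod.snd).sum

lemma sumAt_nil (k : String) : sumAt [] k = 0 := rfl

lemma sumAt_eq_zero_of_not_mem (l : List (String × Int)) (k : String)
    (h : k ∉ l.map Prod.fst) : sumAt l k = 0 := by
  unfold sumAt
  have : l.filter (fun p => p.1 == k) = [] := by
    apply List.filter_eq_nil_iff.2
    intro p hp hpk
    exact h (List.mem_map.2 ⟨p, hp, by simpa using hpk⟩)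
  simp [this]

lemma sumAt_cons_self (p : String × Int) (t : List (String × Int))
    (h : p.1 ∉ t.map Prod.fst) : sumAt (p :: t) p.1 = p.2 := by
  have h0 : sumAt t p.1 = 0 := sumAt_eq_zero_of_not_mem t p.1 h
  unfold sumAt at h0 ⊢
  simp [h0]

lemma sumAt_cons_eq (p : String × Int) (t : List (String × Int)) (k : String)
    (h : k = p.1) : sumAt (p :: t) k = p.2 + sumAt t k := by
  unfold sumAt
  simp [h]

lemma sumAt_cons_of_ne (p : String × Int) (t : List (String × Int)) (k : String)
    (h : k ≠ p.1) : sumAt (p :: t) k = sumAt t k := by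
  unfold sumAt
  simp [(by simpa using h.symm : ¬ (p.1 == k) = true)]

lemma sumAt_eq_of_mem (l : List (String × Int)) (k : String) (w : Int)
    (hn : (l.map Prod.fst).Nodup) (hm : (k, w) ∈ l) : sumAt l k = w := by
  induction l with
  | nil => simp at hm
  | cons p t ih =>
    rcases List.mem_cons.1 hm with h | h
    · rw [← h] at hn ⊢
      exact sumAt_cons_self (k, w) t (by simpa using (List.nodup_cons.1 hn).1)
    · have hk : k ≠ p.1 := fun h' =>
        (List.nodup_cons.1 hn).1 (List.mem_map.2 ⟨(k, w), h, h'⟩)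
      rw [sumAt_cons_of_ne p t k hk]
      exact ih (List.nodup_cons.1 hn).2 h

-- the core invariant of A's update loop
lemma fold_items (l : List (String × Int)) (d : PySem.Dict String Int)
    (hd : d.keys.Nodup) (hl : (l.map Prod.fst).Nodup) :
    (l.foldl
      (fun inventario_total p =>
        if inventario_total.contains p.1 then
          inventario_total.modify p.1 0 (· + p.2)
        else
          inventario_total.insert p.1 p.2) d).items
      = d.items.map (fun q => (q.1, q.2 + sumAt l q.1))
        ++ l.filter (fun p => !d.contains p.1) := by
  induction l generalizing d with
  | nil => simp [sumAt_nil]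
  | cons p t ih =>
    have hp : p.1 ∉ t.map Prod.fst := by simpa using (List.nodup_cons.1 hl).1
    have ht : (t.map Prod.fst).Nodup := (List.nodup_cons.1 hl).2
    simp only [List.foldl_cons]
    by_cases hc : d.contains p.1 = true
    · -- key already present: in-place modify
      rw [if_pos hc]
      have hkeys : (d.modify p.1 0 (· + p.2)).keys = (d.insert p.1 (d.getD p.1 0 + p.2)).keys :=
        PySem.Dict.keys_modify d p.1 0 (· + p.2)
      have hd' : (d.modify p.1 0 (· + p.2)).keys.Nodup := by
        rw [hkeys]; exact PySem.Dict.nodup_keys_insert d p.1 _ hd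
      rw [ih _ hd' ht]
      have hitems : (d.modify p.1 0 (· + p.2)).items
          = d.items.map (fun q => if (q.1 == p.1) = true then (p.1, d.getD p.1 0 + p.2) else q) :=
        PySem.Dict.items_insert_of_contains d _ hc
      rw [hitems]
      congr 1
      · rw [List.map_map]
        apply List.map_congr_left
        intro q hq
        by_cases hqk : (q.1 == p.1) = true
        · have hq1 : q.1 = p.1 := by simpa using hqk
          have hgd : d.getD p.1 0 = q.2 := by
            rw [← hq1]
            exact PySem.Dict.getD_of_mem_items d (by simpa using hq) hd 0
          simp only [Function.comp_apply, hqk, if_true, hgd]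
          rw [sumAt_cons_eq p t q.1 hq1, hq1]
          simp [add_assoc]
        · have hq1 : q.1 ≠ p.1 := by simpa using hqk
          simp only [Function.comp_apply, hqk, if_false, Bool.false_eq_true]
          rw [sumAt_cons_of_ne p t q.1 hq1]
      · have hcm : ∀ q ∈ t, (!(d.modify p.1 0 (· + p.2)).contains q.1) = (!d.contains q.1) := by
          intro q hq
          have hq1 : q.1 ≠ p.1 := by
            rintro h
            exact hp (h ▸ List.mem_map.2 ⟨q, hq, rfl⟩)
          rw [PySem.Dict.contains_modify]
          simp [hq1]
        rw [List.filter_congr hcm, List.filter_cons]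
        simp [hc]
    · -- new key: append
      rw [if_neg hc]
      have hcf : d.contains p.1 = false := by simpa using hc
      have hd' : (d.insert p.1 p.2).keys.Nodup :=
        PySem.Dict.nodup_keys_insert d p.1 _ hd
      rw [ih _ hd' ht]
      rw [PySem.Dict.items_insert_of_not_contains d p.2 hcf]
      rw [List.map_append]
      have h0 : sumAt t p.1 = 0 := sumAt_eq_zero_of_not_mem t p.1 hp
      have hfilt : t.filter (fun q => !(d.insert p.1 p.2).contains q.1)
          = t.filter (fun q => !d.contains q.1) := by
        apply List.filter_congr
        intro q hq
        have hq1 : q.1 ≠ p.1 := by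
          rintro h
          exact hp (h ▸ List.mem_map.2 ⟨q, hq, rfl⟩)
        rw [PySem.Dict.contains_insert]
        simp [hq1]
      rw [hfilt]
      have hmap : d.items.map (fun q => (q.1, q.2 + sumAt t q.1))
          = d.items.map (fun q => (q.1, q.2 + sumAt (p :: t) q.1)) := by
        apply List.map_congr_left
        intro q hq
        have hq1 : q.1 ≠ p.1 := by
          rintro h
          have hcq : d.contains q.1 = true :=
            (PySem.Dict.contains_iff_mem_keys d q.1).2 (PySem.Dict.mem_keys_of_mem_items d hq)
          rw [h, hcf] at hcq
          exact Bool.false_ne_true hcq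
        rw [sumAt_cons_of_ne p t q.1 hq1]
      rw [List.filter_cons]
      simp [hmap, h0, hcf]

-- (ofList l).items = l when keys are unique
lemma items_ofList (l : List (String × Int)) (hl : (l.map Prod.fst).Nodup) :
    (PySem.Dict.ofList l).items = l := by
  have := PySem.Dict.items_foldl_insert_fresh l Prod.fst Prod.snd PySem.Dict.empty
    (fun a _ => PySem.Dict.contains_empty a.1) hl
  simpa [PySem.Dict.ofList, PySem.Dict.update] using this

theorem combinar_inventarios_spec : Claim_equal_combinar_inventarios := by
  intro a b _ hpre
  obtain ⟨ha, hb⟩ := hpre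
  unfold Spec_combinar_inventarios combinar_inventarios combinar_inventarios_alt
  rw [fold_items b (PySem.Dict.ofList a) (PySem.Dict.nodup_keys_ofList a) hb]
  rw [items_ofList a ha]
  congr 1
  apply List.map_congr_left
  intro p hp
  cases hget : (PySem.Dict.ofList b).get? p.1 with
  | none =>
    have hk : p.1 ∉ b.map Prod.fst := by
      have := (PySem.Dict.get?_eq_none_iff_not_mem_keys (PySem.Dict.ofList b) p.1).1 hget
      simpa [PySem.Dict.keys, items_ofList b hb] using this
    simp [sumAt_eq_zero_of_not_mem b p.1 hk]
  | some w =>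
    have hm : (p.1, w) ∈ b := by
      have := (PySem.Dict.get?_eq_some_iff_mem_items (PySem.Dict.ofList b) p.1 w
        (PySem.Dict.nodup_keys_ofList b)).1 hget
      simpa [items_ofList b hb] using this
    simp [sumAt_eq_of_mem b p.1 w hb hm]
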